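-- pv_equiv track=rewrite | github.com/MariiaMostova/algo_lab4 | Graph.py | couple_count
-- ===== SOURCE A (Python) =====
-- def couple_count(first_g, second_g):
--     first_girls, first_boys, second_girls, second_boys = [], [], [], []
--     for i in range(len(first_g)):
--         if first_g[i] % 2 == 0:
--             first_girls.append(first_g[i])
--         else:
--             first_boys.append(first_g[i])
--     for i in range(len(second_g)):
--         if second_g[i] % 2 == 0:
--             second_girls.append(second_g[i])
--         else:
--             second_boys.append(second_g[i])
--     return len(first_girls) * len(second_boys) + len(first_boys) * len(second_girls)
-- ===== SOURCE B (Python) =====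
-- def couple_count(first_g, second_g):
--     # Brute force: a couple is one element from each group whose sum is odd;
--     # (x + y) % 2 is 1 exactly for cross-parity pairs, so just sum it over all pairs.
--     total = 0
--     for x in first_g:
--         for y in second_g:
--             total += (x + y) % 2
--     return total
-- ===== Notes on version B (the rewrite author's own statement) =====
-- stated objective: alternative
-- what changed: B brute-forces the cartesian product, summing (x+y) % 2 over every pair (1 exactly for a cross-parity couple), instead of A's partition into four parity lists and product-of-lengths formula; it trades O(n+m) counting for a direct O(n*m) pair enumeration with O(1) space.
import Mathlib
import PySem

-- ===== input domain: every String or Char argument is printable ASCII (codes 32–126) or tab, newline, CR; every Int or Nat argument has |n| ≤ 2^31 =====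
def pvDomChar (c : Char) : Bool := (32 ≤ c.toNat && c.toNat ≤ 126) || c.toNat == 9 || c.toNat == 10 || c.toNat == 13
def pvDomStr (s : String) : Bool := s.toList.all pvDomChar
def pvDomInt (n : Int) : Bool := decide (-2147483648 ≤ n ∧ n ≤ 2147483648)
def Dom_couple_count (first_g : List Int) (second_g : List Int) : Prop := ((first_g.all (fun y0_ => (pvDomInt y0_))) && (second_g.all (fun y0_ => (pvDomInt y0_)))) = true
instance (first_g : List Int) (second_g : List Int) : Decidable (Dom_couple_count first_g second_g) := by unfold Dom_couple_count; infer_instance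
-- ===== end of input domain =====

-- B enumerates the cartesian product directly, summing (x+y) % 2 over every pair, instead of A's
-- four parity lists and product-of-lengths formula (alternative algorithm, O(n*m) time, O(1) space).

-- ===== PORT A =====
-- A's two for-loops: fold over the list, appending each element to the girls or boys list by parity
def pvPartA (xs : List Int) : List Int × List Int :=
  xs.foldl (fun p x =>
    if PySem.Int.mod x 2 == 0 then (p.1 ++ [x], p.2) else (p.1, p.2 ++ [x])) ([], [])

def couple_count (first_g : List Int) (second_g : List Int) : Int :=
  let p1 := pvPartA first_g
  let p2 := pvPartA second_g
  (p1.1.length : Int) * (p2.2.length : Int) + (p1.2.length : Int) * (p2.1.length : Int)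

-- ===== PORT B =====
-- nested for-loops accumulating total += (x + y) % 2
def couple_count_alt (first_g : List Int) (second_g : List Int) : Int :=
  first_g.foldl (fun total x =>
    second_g.foldl (fun total y => total + PySem.Int.mod (x + y) 2) total) 0

-- ===== PRECONDITION & SPEC =====
def Spec_couple_count (first_g : List Int) (second_g : List Int) (out : Int) : Prop := out = couple_count_alt first_g second_g
instance (first_g : List Int) (second_g : List Int) (out : Int) : Decidable (Spec_couple_count first_g second_g out) := by unfold Spec_couple_count; infer_instance

-- ===== CLAIM (what is proved, stated in full; the proofs are below) =====
def Claim_equal_couple_count : Prop := ∀ (first_g : List Int) (second_g : List Int), Dom_couple_count first_g second_g → Spec_couple_count first_g second_g (couple_count first_g second_g)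

-- ===== LEMMAS AND PROOFS =====

theorem pvPartA_go (p : Int → Bool) (xs a b : List Int) :
    xs.foldl (fun s x => if p x then (s.1 ++ [x], s.2) else (s.1, s.2 ++ [x])) (a, b)
      = (a ++ xs.filter p, b ++ xs.filter (fun x => !p x)) := by
  induction xs generalizing a b with
  | nil => simp
  | cons x xs ih =>
    by_cases h : p x <;> simp [List.filter_cons, h, ih]

-- (x + y) % 2 in Python is 1 for cross parity, 0 for same parity
theorem pvMod2_cross (x y : Int) :
    PySem.Int.mod (x + y) 2
      = if (PySem.Int.mod x 2 == 0) = (PySem.Int.mod y 2 == 0) then 0 else 1 := by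
  simp only [PySem.Int.mod_eq_emod_of_pos (show (0:Int) < 2 by norm_num)]
  have hx := Int.emod_two_eq_zero_or_one x
  have hy := Int.emod_two_eq_zero_or_one y
  have hxy : (x + y) % 2 = (x % 2 + y % 2) % 2 := by omega
  rcases hx with hx | hx <;> rcases hy with hy | hy <;>
    simp [hxy, hx, hy]

-- inner loop, generically: summing f y which is the indicator of p counts filter p
theorem pvInner (p : Int → Bool) (f : Int → Int)
    (hf : ∀ y, f y = if p y then (1 : Int) else 0) (ys : List Int) (c : Int) :
    ys.foldl (fun total y => total + f y) c
      = c + ((ys.filter p).length : Int) := by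
  induction ys generalizing c with
  | nil => simp
  | cons y ys ih =>
    rw [List.foldl_cons, ih, hf]
    cases h : p y <;> simp [h, List.filter_cons] <;> ring

-- outer loop: accumulates (#p) * B + (#¬p) * C
theorem pvOuter (p : Int → Bool) (xs : List Int) (B C a : Int) :
    xs.foldl (fun acc x => acc + (if p x then B else C)) a
      = a + ((xs.filter p).length : Int) * B
          + ((xs.filter (fun x => !p x)).length : Int) * C := by
  induction xs generalizing a with
  | nil => simp
  | cons x xs ih =>
    cases h : p x <;> simp [List.filter_cons, h, ih] <;> ring

theorem couple_count_eq (first_g second_g : List Int) :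
    couple_count first_g second_g = couple_count_alt first_g second_g := by
  unfold couple_count couple_count_alt pvPartA
  rw [pvPartA_go, pvPartA_go]
  have h : (fun (total : Int) (x : Int) =>
      second_g.foldl (fun total y => total + PySem.Int.mod (x + y) 2) total)
      = fun (acc : Int) (x : Int) => acc +
          (if PySem.Int.mod x 2 == 0
           then ((second_g.filter (fun y => !(PySem.Int.mod y 2 == 0))).length : Int)
           else ((second_g.filter (fun y => PySem.Int.mod y 2 == 0)).length : Int)) := by
    funext c x
    cases hx : PySem.Int.mod x 2 == 0 with
    | true =>
      rw [if_pos rfl]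
      exact pvInner (fun y => !(PySem.Int.mod y 2 == 0)) _
        (fun y => by rw [pvMod2_cross, hx]; cases hy : PySem.Int.mod y 2 == 0 <;> simp only [hy] <;> decide)
        second_g c
    | false =>
      rw [if_neg (by simp [hx])]
      exact pvInner (fun y => PySem.Int.mod y 2 == 0) _
        (fun y => by rw [pvMod2_cross, hx]; cases hy : PySem.Int.mod y 2 == 0 <;> simp only [hy] <;> decide)
        second_g c
  rw [h, pvOuter]
  simp only [List.nil_append, zero_add]

-- ===== VERDICT (by name: the statement is the Claim_ definition above) =====
theorem couple_count_spec : Claim_equal_couple_count := by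
  intro first_g second_g _
  unfold Spec_couple_count
  exact couple_count_eq first_g second_g
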